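-- pv_equiv track=rewrite | github.com/FerhatKartal/text_correction | arrays_and_indexes.py | arrayAndIndexes
-- ===== SOURCE A (Python) =====
-- def arrayAndIndexes(total):
--
--     iki=[]         #veri aramasını hızlandırmak için datalar kelime uzunluğuna göre gruplara ayrılır
--     uc=[]
--     dort=[]
--     bes=[]
--     alti=[]
--     yedi=[]
--     sekiz=[]
--     dokuz=[]
--     on=[]
--     iki_index=[]         #veri aramasını hızlandırmak için datalar kelimelerdeki harflerin değerlerinin toplamına göre gruplara ayrılır
--     uc_index=[]
--     dort_index=[]
--     bes_index=[]
--     alti_index=[]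
--     yedi_index=[]
--     sekiz_index=[]
--     dokuz_index=[]
--     on_index=[]
--
--     total_index=[]
--     for k in total:
--         x=k.lstrip()
--         c=0
--         for i in x:
--             c+=(ord(i))
--
--         total_index.append(c)
--
--
--
--     for i in range(len(total)):
--         s=i
--         i=str(total[i])
--         if(len(i)==1 or len(i)==2 or len(i)==3):
--             iki.append(i)
--             iki_index.append(total_index[s])
--         if(len(i)==2 or len(i)==3 or len(i)==4):
--             uc.append(i)
--             uc_index.append(total_index[s])
--         if(len(i)==3 or len(i)==4 or len(i)==5):
--             dort.append(i)
--             dort_index.append(total_index[s])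
--         if(len(i)==4 or len(i)==5 or len(i)==6):
--             bes.append(i)
--             bes_index.append(total_index[s])
--         if(len(i)==5 or len(i)==6 or len(i)==7):
--             alti.append(i)
--             alti_index.append(total_index[s])
--         if(len(i)==6 or len(i)==7 or len(i)==8):
--             yedi.append(i)
--             yedi_index.append(total_index[s])
--         if(len(i)==7 or len(i)==8 or len(i)==9):
--             sekiz.append(i)
--             sekiz_index.append(total_index[s])
--         if(len(i)==8 or len(i)==9 or len(i)==10):
--             dokuz.append(i)
--             dokuz_index.append(total_index[s])
--         if(len(i)==9 or len(i)>=10):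
--             on.append(i)
--             on_index.append(total_index[s])
--
--     return iki,uc,dort,bes,alti,yedi,sekiz,dokuz,on,iki_index,uc_index,dort_index,bes_index,alti_index,yedi_index,sekiz_index,dokuz_index,on_index
-- ===== SOURCE B (Python) =====
-- def arrayAndIndexes(total):
--     # table-driven: one (lo, hi) length-window per bucket, buckets built by comprehension
--     def csum(k):
--         return sum(ord(ch) for ch in k.lstrip())
--
--     def fits(k, lo, hi):
--         n = len(str(k))
--         return lo <= n and (hi is None or n <= hi)
--
--     def bucket(lo, hi):
--         return [str(k) for k in total if fits(k, lo, hi)]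
--
--     def index(lo, hi):
--         return [csum(k) for k in total if fits(k, lo, hi)]
--
--     windows = [(1, 3), (2, 4), (3, 5), (4, 6), (5, 7), (6, 8), (7, 9), (8, 10), (9, None)]
--     return tuple(bucket(lo, hi) for lo, hi in windows) + tuple(index(lo, hi) for lo, hi in windows)
-- ===== Notes on version B (the rewrite author's own statement) =====
-- stated objective: simpler
-- what changed: Replaces the two accumulation loops with nine cascaded ifs by a table of (lo,hi) length-windows and per-window filter comprehensions that build each bucket and index list directly.
import Mathlib
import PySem

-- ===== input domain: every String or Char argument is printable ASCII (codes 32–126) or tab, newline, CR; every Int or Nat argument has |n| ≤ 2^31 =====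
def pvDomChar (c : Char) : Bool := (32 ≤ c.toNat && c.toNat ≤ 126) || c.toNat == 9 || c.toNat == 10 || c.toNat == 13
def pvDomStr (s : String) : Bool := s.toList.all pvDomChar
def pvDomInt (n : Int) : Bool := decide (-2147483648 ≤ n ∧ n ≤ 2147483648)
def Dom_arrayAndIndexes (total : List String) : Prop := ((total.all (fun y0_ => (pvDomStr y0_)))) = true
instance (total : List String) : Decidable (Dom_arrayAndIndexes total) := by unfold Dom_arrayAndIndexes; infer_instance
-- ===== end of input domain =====

-- B replaces A's nine-branch cascade by a table of length-windows with per-window filters (objective: simpler).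

-- ===== PORT A =====
-- literal port: first loop builds total_index (char-sums of the lstripped strings),
-- second loop walks range(len(total)) with nine interleaved ifs; str(total[i]) is the
-- identity because total holds strings
def arrayAndIndexes (total : List String) : List String × List String × List String × List String × List String × List String × List String × List String × List String × List Int × List Int × List Int × List Int × List Int × List Int × List Int × List Int × List Int :=
  let total_index : List Int :=
    total.foldl (fun acc k =>
      acc ++ [(PySem.Str.lstrip k).toList.foldl (fun c i => c + (i.toNat : Int)) 0]) []
  (PySem.List.pyRange 0 (PySem.List.len total)).foldl
    (fun acc s =>
      match acc with
      | (iki, uc, dort, bes, alti, yedi, sekiz, dokuz, on,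
         iki_i, uc_i, dort_i, bes_i, alti_i, yedi_i, sekiz_i, dokuz_i, on_i) =>
        let i := PySem.List.pyGetD total s ""
        let t := PySem.List.pyGetD total_index s 0
        ((if PySem.Str.len i == 1 || PySem.Str.len i == 2 || PySem.Str.len i == 3 then iki ++ [i] else iki),
         (if PySem.Str.len i == 2 || PySem.Str.len i == 3 || PySem.Str.len i == 4 then uc ++ [i] else uc),
         (if PySem.Str.len i == 3 || PySem.Str.len i == 4 || PySem.Str.len i == 5 then dort ++ [i] else dort),
         (if PySem.Str.len i == 4 || PySem.Str.len i == 5 || PySem.Str.len i == 6 then bes ++ [i] else bes),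
         (if PySem.Str.len i == 5 || PySem.Str.len i == 6 || PySem.Str.len i == 7 then alti ++ [i] else alti),
         (if PySem.Str.len i == 6 || PySem.Str.len i == 7 || PySem.Str.len i == 8 then yedi ++ [i] else yedi),
         (if PySem.Str.len i == 7 || PySem.Str.len i == 8 || PySem.Str.len i == 9 then sekiz ++ [i] else sekiz),
         (if PySem.Str.len i == 8 || PySem.Str.len i == 9 || PySem.Str.len i == 10 then dokuz ++ [i] else dokuz),
         (if PySem.Str.len i == 9 || decide (10 ≤ PySem.Str.len i) then on ++ [i] else on),
         (if PySem.Str.len i == 1 || PySem.Str.len i == 2 || PySem.Str.len i == 3 then iki_i ++ [t] else iki_i),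
         (if PySem.Str.len i == 2 || PySem.Str.len i == 3 || PySem.Str.len i == 4 then uc_i ++ [t] else uc_i),
         (if PySem.Str.len i == 3 || PySem.Str.len i == 4 || PySem.Str.len i == 5 then dort_i ++ [t] else dort_i),
         (if PySem.Str.len i == 4 || PySem.Str.len i == 5 || PySem.Str.len i == 6 then bes_i ++ [t] else bes_i),
         (if PySem.Str.len i == 5 || PySem.Str.len i == 6 || PySem.Str.len i == 7 then alti_i ++ [t] else alti_i),
         (if PySem.Str.len i == 6 || PySem.Str.len i == 7 || PySem.Str.len i == 8 then yedi_i ++ [t] else yedi_i),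
         (if PySem.Str.len i == 7 || PySem.Str.len i == 8 || PySem.Str.len i == 9 then sekiz_i ++ [t] else sekiz_i),
         (if PySem.Str.len i == 8 || PySem.Str.len i == 9 || PySem.Str.len i == 10 then dokuz_i ++ [t] else dokuz_i),
         (if PySem.Str.len i == 9 || decide (10 ≤ PySem.Str.len i) then on_i ++ [t] else on_i)))
    ([], [], [], [], [], [], [], [], [], [], [], [], [], [], [], [], [], [])

-- ===== PORT B =====
def pvCsum (k : String) : Int :=
  ((PySem.Str.lstrip k).toList.map (fun ch => (ch.toNat : Int))).sum

def pvFits (k : String) (lo : Int) (hi : Option Int) : Bool :=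
  let n := PySem.Str.len k
  decide (lo ≤ n) && (match hi with | none => true | some h => decide (n ≤ h))

def pvBucket (total : List String) (lo : Int) (hi : Option Int) : List String :=
  total.filter (fun k => pvFits k lo hi)

def pvIndex (total : List String) (lo : Int) (hi : Option Int) : List Int :=
  (total.filter (fun k => pvFits k lo hi)).map pvCsum

def arrayAndIndexes_alt (total : List String) : List String × List String × List String × List String × List String × List String × List String × List String × List String × List Int × List Int × List Int × List Int × List Int × List Int × List Int × List Int × List Int :=
  (pvBucket total 1 (some 3), pvBucket total 2 (some 4), pvBucket total 3 (some 5),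
   pvBucket total 4 (some 6), pvBucket total 5 (some 7), pvBucket total 6 (some 8),
   pvBucket total 7 (some 9), pvBucket total 8 (some 10), pvBucket total 9 none,
   pvIndex total 1 (some 3), pvIndex total 2 (some 4), pvIndex total 3 (some 5),
   pvIndex total 4 (some 6), pvIndex total 5 (some 7), pvIndex total 6 (some 8),
   pvIndex total 7 (some 9), pvIndex total 8 (some 10), pvIndex total 9 none)

-- ===== PRECONDITION & SPEC =====
def Spec_arrayAndIndexes (total : List String) (out : List String × List String × List String × List String × List String × List String × List String × List String × List String × List Int × List Int × List Int × List Int × List Int × List Int × List Int × List Int × List Int) : Prop := out = arrayAndIndexes_alt total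
instance (total : List String) (out : List String × List String × List String × List String × List String × List String × List String × List String × List String × List Int × List Int × List Int × List Int × List Int × List Int × List Int × List Int × List Int) : Decidable (Spec_arrayAndIndexes total out) := by
  unfold Spec_arrayAndIndexes
  letI a1 : DecidableEq (List Int × List Int) := inferInstance
  letI a2 : DecidableEq (List Int × List Int × List Int) := @instDecidableEqProd _ _ _ a1
  letI a3 : DecidableEq (List Int × List Int × List Int × List Int) := @instDecidableEqProd _ _ _ a2
  letI a4 : DecidableEq (List Int × List Int × List Int × List Int × List Int) := @instDecidableEqProd _ _ _ a3
  letI a5 : DecidableEq (List Int × List Int × List Int × List Int × List Int × List Int) := @instDecidableEqProd _ _ _ a4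
  letI a6 : DecidableEq (List Int × List Int × List Int × List Int × List Int × List Int × List Int) := @instDecidableEqProd _ _ _ a5
  letI a7 : DecidableEq (List Int × List Int × List Int × List Int × List Int × List Int × List Int × List Int) := @instDecidableEqProd _ _ _ a6
  letI a8 : DecidableEq (List Int × List Int × List Int × List Int × List Int × List Int × List Int × List Int × List Int) := @instDecidableEqProd _ _ _ a7
  letI b1 : DecidableEq (List String × List Int × List Int × List Int × List Int × List Int × List Int × List Int × List Int × List Int) := @instDecidableEqProd _ _ _ a8
  letI b2 : DecidableEq (List String × List String × List Int × List Int × List Int × List Int × List Int × List Int × List Int × List Int × List Int) := @instDecidableEqProd _ _ _ b1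
  letI b3 : DecidableEq (List String × List String × List String × List Int × List Int × List Int × List Int × List Int × List Int × List Int × List Int × List Int) := @instDecidableEqProd _ _ _ b2
  letI b4 : DecidableEq (List String × List String × List String × List String × List Int × List Int × List Int × List Int × List Int × List Int × List Int × List Int × List Int) := @instDecidableEqProd _ _ _ b3
  letI b5 : DecidableEq (List String × List String × List String × List String × List String × List Int × List Int × List Int × List Int × List Int × List Int × List Int × List Int × List Int) := @instDecidableEqProd _ _ _ b4
  letI b6 : DecidableEq (List String × List String × List String × List String × List String × List String × List Int × List Int × List Int × List Int × List Int × List Int × List Int × List Int × List Int) := @instDecidableEqProd _ _ _ b5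
  letI b7 : DecidableEq (List String × List String × List String × List String × List String × List String × List String × List Int × List Int × List Int × List Int × List Int × List Int × List Int × List Int × List Int) := @instDecidableEqProd _ _ _ b6
  letI b8 : DecidableEq (List String × List String × List String × List String × List String × List String × List String × List String × List Int × List Int × List Int × List Int × List Int × List Int × List Int × List Int × List Int) := @instDecidableEqProd _ _ _ b7
  letI b9 : DecidableEq (List String × List String × List String × List String × List String × List String × List String × List String × List String × List Int × List Int × List Int × List Int × List Int × List Int × List Int × List Int × List Int) := @instDecidableEqProd _ _ _ b8
  exact b9 out (arrayAndIndexes_alt total)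

-- ===== CLAIM (what is proved, stated in full; the proofs are below) =====
def Claim_equal_arrayAndIndexes : Prop := ∀ (total : List String), Dom_arrayAndIndexes total → Spec_arrayAndIndexes total (arrayAndIndexes total)

-- ===== LEMMAS AND PROOFS =====

-- A's per-element step, once the index lookups are expressed through the element itself
def pvStepElem (acc : List String × List String × List String × List String × List String × List String × List String × List String × List String × List Int × List Int × List Int × List Int × List Int × List Int × List Int × List Int × List Int) (k : String) : List String × List String × List String × List String × List String × List String × List String × List String × List String × List Int × List Int × List Int × List Int × List Int × List Int × List Int × List Int × List Int :=
  match acc with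
  | (iki, uc, dort, bes, alti, yedi, sekiz, dokuz, on,
     iki_i, uc_i, dort_i, bes_i, alti_i, yedi_i, sekiz_i, dokuz_i, on_i) =>
    let t := pvCsum k
    ((if PySem.Str.len k == 1 || PySem.Str.len k == 2 || PySem.Str.len k == 3 then iki ++ [k] else iki),
     (if PySem.Str.len k == 2 || PySem.Str.len k == 3 || PySem.Str.len k == 4 then uc ++ [k] else uc),
     (if PySem.Str.len k == 3 || PySem.Str.len k == 4 || PySem.Str.len k == 5 then dort ++ [k] else dort),
     (if PySem.Str.len k == 4 || PySem.Str.len k == 5 || PySem.Str.len k == 6 then bes ++ [k] else bes),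
     (if PySem.Str.len k == 5 || PySem.Str.len k == 6 || PySem.Str.len k == 7 then alti ++ [k] else alti),
     (if PySem.Str.len k == 6 || PySem.Str.len k == 7 || PySem.Str.len k == 8 then yedi ++ [k] else yedi),
     (if PySem.Str.len k == 7 || PySem.Str.len k == 8 || PySem.Str.len k == 9 then sekiz ++ [k] else sekiz),
     (if PySem.Str.len k == 8 || PySem.Str.len k == 9 || PySem.Str.len k == 10 then dokuz ++ [k] else dokuz),
     (if PySem.Str.len k == 9 || decide (10 ≤ PySem.Str.len k) then on ++ [k] else on),
     (if PySem.Str.len k == 1 || PySem.Str.len k == 2 || PySem.Str.len k == 3 then iki_i ++ [t] else iki_i),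
     (if PySem.Str.len k == 2 || PySem.Str.len k == 3 || PySem.Str.len k == 4 then uc_i ++ [t] else uc_i),
     (if PySem.Str.len k == 3 || PySem.Str.len k == 4 || PySem.Str.len k == 5 then dort_i ++ [t] else dort_i),
     (if PySem.Str.len k == 4 || PySem.Str.len k == 5 || PySem.Str.len k == 6 then bes_i ++ [t] else bes_i),
     (if PySem.Str.len k == 5 || PySem.Str.len k == 6 || PySem.Str.len k == 7 then alti_i ++ [t] else alti_i),
     (if PySem.Str.len k == 6 || PySem.Str.len k == 7 || PySem.Str.len k == 8 then yedi_i ++ [t] else yedi_i),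
     (if PySem.Str.len k == 7 || PySem.Str.len k == 8 || PySem.Str.len k == 9 then sekiz_i ++ [t] else sekiz_i),
     (if PySem.Str.len k == 8 || PySem.Str.len k == 9 || PySem.Str.len k == 10 then dokuz_i ++ [t] else dokuz_i),
     (if PySem.Str.len k == 9 || decide (10 ≤ PySem.Str.len k) then on_i ++ [t] else on_i))

theorem pvCsum_foldl (k : String) :
    (PySem.Str.lstrip k).toList.foldl (fun c i => c + (i.toNat : Int)) 0 = pvCsum k := by
  simpa [pvCsum] using PySem.List.foldl_add (PySem.Str.lstrip k).toList (fun i => (i.toNat : Int)) 0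

theorem pvTotalIndex_eq (total : List String) :
    total.foldl (fun acc k =>
      acc ++ [(PySem.Str.lstrip k).toList.foldl (fun c i => c + (i.toNat : Int)) 0]) [] =
    total.map pvCsum := by
  rw [PySem.List.foldl_append_singleton_eq_map, List.nil_append]
  exact List.map_congr_left (fun a _ => pvCsum_foldl a)

theorem pvCsum_empty : pvCsum "" = 0 := rfl

theorem pvGetD_map_csum (total : List String) (s : Int) :
    PySem.List.pyGetD (total.map pvCsum) s 0 = pvCsum (PySem.List.pyGetD total s "") := by
  rw [show (0 : Int) = pvCsum "" from pvCsum_empty.symm]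
  exact PySem.List.pyGetD_map pvCsum total s ""

theorem pvFits1 (k : String) : (PySem.Str.len k == 1 || PySem.Str.len k == 2 || PySem.Str.len k == 3) = pvFits k 1 (some 3) := by
  apply Bool.eq_iff_iff.mpr; simp [pvFits, PySem.Str.len_eq]; omega
theorem pvFits2 (k : String) : (PySem.Str.len k == 2 || PySem.Str.len k == 3 || PySem.Str.len k == 4) = pvFits k 2 (some 4) := by
  apply Bool.eq_iff_iff.mpr; simp [pvFits, PySem.Str.len_eq]; omega
theorem pvFits3 (k : String) : (PySem.Str.len k == 3 || PySem.Str.len k == 4 || PySem.Str.len k == 5) = pvFits k 3 (some 5) := by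
  apply Bool.eq_iff_iff.mpr; simp [pvFits, PySem.Str.len_eq]; omega
theorem pvFits4 (k : String) : (PySem.Str.len k == 4 || PySem.Str.len k == 5 || PySem.Str.len k == 6) = pvFits k 4 (some 6) := by
  apply Bool.eq_iff_iff.mpr; simp [pvFits, PySem.Str.len_eq]; omega
theorem pvFits5 (k : String) : (PySem.Str.len k == 5 || PySem.Str.len k == 6 || PySem.Str.len k == 7) = pvFits k 5 (some 7) := by
  apply Bool.eq_iff_iff.mpr; simp [pvFits, PySem.Str.len_eq]; omega
theorem pvFits6 (k : String) : (PySem.Str.len k == 6 || PySem.Str.len k == 7 || PySem.Str.len k == 8) = pvFits k 6 (some 8) := by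
  apply Bool.eq_iff_iff.mpr; simp [pvFits, PySem.Str.len_eq]; omega
theorem pvFits7 (k : String) : (PySem.Str.len k == 7 || PySem.Str.len k == 8 || PySem.Str.len k == 9) = pvFits k 7 (some 9) := by
  apply Bool.eq_iff_iff.mpr; simp [pvFits, PySem.Str.len_eq]; omega
theorem pvFits8 (k : String) : (PySem.Str.len k == 8 || PySem.Str.len k == 9 || PySem.Str.len k == 10) = pvFits k 8 (some 10) := by
  apply Bool.eq_iff_iff.mpr; simp [pvFits, PySem.Str.len_eq]; omega
theorem pvFits9 (k : String) : (PySem.Str.len k == 9 || decide (10 ≤ PySem.Str.len k)) = pvFits k 9 none := by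
  apply Bool.eq_iff_iff.mpr; simp [pvFits, PySem.Str.len_eq]; omega

theorem pvFoldl_stepElem (total : List String) : ∀ (a1 a2 a3 a4 a5 a6 a7 a8 a9 : List String) (c1 c2 c3 c4 c5 c6 c7 c8 c9 : List Int),
    total.foldl pvStepElem (a1, a2, a3, a4, a5, a6, a7, a8, a9, c1, c2, c3, c4, c5, c6, c7, c8, c9) =
      (a1 ++ pvBucket total 1 (some 3), a2 ++ pvBucket total 2 (some 4), a3 ++ pvBucket total 3 (some 5),
       a4 ++ pvBucket total 4 (some 6), a5 ++ pvBucket total 5 (some 7), a6 ++ pvBucket total 6 (some 8),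
       a7 ++ pvBucket total 7 (some 9), a8 ++ pvBucket total 8 (some 10), a9 ++ pvBucket total 9 none,
       c1 ++ pvIndex total 1 (some 3), c2 ++ pvIndex total 2 (some 4), c3 ++ pvIndex total 3 (some 5),
       c4 ++ pvIndex total 4 (some 6), c5 ++ pvIndex total 5 (some 7), c6 ++ pvIndex total 6 (some 8),
       c7 ++ pvIndex total 7 (some 9), c8 ++ pvIndex total 8 (some 10), c9 ++ pvIndex total 9 none) := by
  induction total with
  | nil => intro a1 a2 a3 a4 a5 a6 a7 a8 a9 c1 c2 c3 c4 c5 c6 c7 c8 c9; simp [pvBucket, pvIndex]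
  | cons k rest ih =>
    intro a1 a2 a3 a4 a5 a6 a7 a8 a9 c1 c2 c3 c4 c5 c6 c7 c8 c9
    rw [List.foldl_cons]
    simp only [pvStepElem]
    rw [ih]
    simp only [Prod.mk.injEq]
    refine ⟨?_, ?_, ?_, ?_, ?_, ?_, ?_, ?_, ?_, ?_, ?_, ?_, ?_, ?_, ?_, ?_, ?_, ?_⟩ <;>
      · simp only [pvBucket, pvIndex, List.filter_cons, ← pvFits1, ← pvFits2, ← pvFits3,
          ← pvFits4, ← pvFits5, ← pvFits6, ← pvFits7, ← pvFits8, ← pvFits9]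
        split_ifs <;> simp

-- ===== VERDICT (by name: the statement is the Claim_ definition above) =====
theorem arrayAndIndexes_spec : Claim_equal_arrayAndIndexes := by
  intro total _
  show arrayAndIndexes total = arrayAndIndexes_alt total
  simp only [arrayAndIndexes, pvTotalIndex_eq, pvGetD_map_csum]
  show List.foldl (fun acc j => pvStepElem acc (PySem.List.pyGetD total j ""))
      ([], [], [], [], [], [], [], [], [], [], [], [], [], [], [], [], [], [])
      (PySem.List.pyRange 0 (PySem.List.len total)) = arrayAndIndexes_alt total
  rw [PySem.List.foldl_pyRange_pyGetD total "" pvStepElem _ (le_refl 0)]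
  simp only [Int.toNat_zero, List.drop_zero]
  rw [pvFoldl_stepElem]
  simp [arrayAndIndexes_alt]
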